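-- pv_equiv track=rewrite | github.com/LIAAD/tieval | src/tieval/temporal_relation.py | _complete
-- ===== SOURCE A (Python) =====
-- POINT_TRANSITIONS = {
--     "<": {"<": "<", "=": "<", ">": None, None: None},
--     "=": {"<": "<", "=": "=", ">": ">", None: None},
--     ">": {">": ">", "=": ">", "<": None, None: None},
--     None: {">": None, "=": None, "<": None, None: None},
-- }
--
-- INVERSE_POINT_RELATION = {"<": ">", ">": "<", "=": "=", None: None}
--
-- def _complete(start_start, start_end, end_start, end_end):
--     relations = [
--         ("ss", start_start, "ts"),  # source start, target start
--         ("ss", start_end, "te"),  # source start, target end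
--         ("se", end_start, "ts"),  # source end, target start
--         ("se", end_end, "te"),  # source end, target end
--         ("ss", "<", "se"),  # source start, source end
--         ("ts", "<", "te"),  # target start, target end
--     ]
--
--     # creat a dictionary with the input relations
--     relations_dict = {}
--     for src, rel, tgt in relations:
--         if rel:
--             relations_dict[(src, tgt)] = rel
--             relations_dict[(tgt, src)] = INVERSE_POINT_RELATION[rel]
--
--     # infer the relation between all end points
--     flag = True
--     while flag:
--         inferred_relations = {}
--         # infer all possible relations
--         for (p1, p2), rel12 in relations_dict.items():
--             for (p3, p4), rel34 in relations_dict.items():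
--                 cond1 = p2 == p3 and p1 != p4
--                 cond2 = (p1, p4) not in relations_dict
--                 cond3 = (p4, p1) not in relations_dict
--                 rel = POINT_TRANSITIONS[rel12][rel34]
--                 if cond1 and cond2 and cond3 and rel:
--                     inferred_relations[(p1, p4)] = rel
--                     inferred_relations[(p4, p1)] = INVERSE_POINT_RELATION[rel]
--
--         if not inferred_relations:
--             flag = False
--
--         relations_dict.update(inferred_relations)
--
--     return [relations_dict.get((src, tgt)) for src, rel, tgt in relations[:4]]
-- ===== SOURCE B (Python) =====
-- def _comp(x, y):
--     # composition of two definite point relations ("<", "=", ">"):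
--     # "=" is neutral, equal strict relations chain, opposite ones are unknown
--     if x == "=":
--         return y
--     if y == "=":
--         return x
--     return x if x == y else None
--
--
-- # the admissible relation arguments, normalised (falsy '' becomes None);
-- # any other string is rejected with a KeyError, as in the original
-- _REL = {None: None, "": None, "<": "<", "=": "=", ">": ">"}
--
--
-- def _complete(start_start, start_end, end_start, end_end):
--     # Four scalar unknowns a=(ss,ts), b=(ss,te), c=(se,ts), d=(se,te); the two
--     # internal edges ss<se, ts<te are baked into the per-slot formulas.  Each
--     # still-unknown slot is filled by the first defined composition among its
--     # two possible two-step chains (the order reproduces the source's dict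
--     # iteration precedence); passes repeat until nothing changes.
--     a = _REL[start_start]
--     b = _REL[start_end]
--     c = _REL[end_start]
--     d = _REL[end_end]
--
--     def chain(x, y):
--         return None if x is None or y is None else _comp(x, y)
--
--     def first(u, v):
--         return u if u is not None else v
--
--     changed = True
--     while changed:
--         na = a if a is not None else first(chain(b, ">"), chain("<", c))
--         nb = b if b is not None else first(chain("<", d), chain(a, "<"))
--         nc = c if c is not None else first(chain(d, ">"), chain(">", a))
--         nd = d if d is not None else first(chain(c, "<"), chain(">", b))
--         changed = (na, nb, nc, nd) != (a, b, c, d)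
--         a, b, c, d = na, nb, nc, nd
--     return [a, b, c, d]
-- ===== Notes on version B (the rewrite author's own statement) =====
-- stated objective: alternative
-- what changed: B drops the relation dictionary, the lookup tables and the generic pairwise closure entirely: it keeps the four cross relations as four scalar variables, fills each missing one by an explicit first-defined-of-two-chain-compositions formula (composition computed arithmetically, not from the table) and repeats that constant-size pass until it stabilises (at most 2 productive passes).
import Mathlib
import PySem

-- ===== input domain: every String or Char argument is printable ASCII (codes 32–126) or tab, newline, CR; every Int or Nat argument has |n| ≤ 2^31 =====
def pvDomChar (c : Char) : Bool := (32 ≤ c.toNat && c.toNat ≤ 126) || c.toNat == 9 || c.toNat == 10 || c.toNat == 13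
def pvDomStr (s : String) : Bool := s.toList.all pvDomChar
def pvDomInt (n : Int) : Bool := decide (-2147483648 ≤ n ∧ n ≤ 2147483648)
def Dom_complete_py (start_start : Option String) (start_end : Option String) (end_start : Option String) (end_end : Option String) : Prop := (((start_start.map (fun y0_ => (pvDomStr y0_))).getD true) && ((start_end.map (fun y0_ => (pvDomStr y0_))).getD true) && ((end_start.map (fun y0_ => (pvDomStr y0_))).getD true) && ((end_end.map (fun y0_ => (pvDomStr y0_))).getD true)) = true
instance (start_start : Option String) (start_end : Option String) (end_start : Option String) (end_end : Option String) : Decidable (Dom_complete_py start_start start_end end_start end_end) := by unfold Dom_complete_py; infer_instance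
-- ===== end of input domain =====

-- B drops A's dict, lookup tables and generic pairwise closure: it keeps the four
-- cross relations as four scalar variables filled by explicit chain-composition
-- formulas, repeated until stable (objective: alternative; same behaviour on Pre_).

-- ===== PORT A =====
-- Module constants used by A.
-- POINT_TRANSITIONS[a][b]; exact for a, b ∈ {"<", "=", ">"}, the only relation
-- strings a Pre_-admitted run ever stores in the dict (elsewhere Python raises).
def pyPointTrans (a b : String) : Option String :=
  if a = "<" then (if b = "<" then some "<" else if b = "=" then some "<" else none)
  else if a = "=" then
    (if b = "<" then some "<" else if b = "=" then some "=" else if b = ">" then some ">" else none)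
  else if a = ">" then (if b = ">" then some ">" else if b = "=" then some ">" else none)
  else none

-- INVERSE_POINT_RELATION[r]; exact for r ∈ {"<", "=", ">"} (elsewhere Python raises KeyError).
def pyInvRel (r : String) : String :=
  if r = "<" then ">" else if r = ">" then "<" else if r = "=" then "=" else ""

-- the seed loop over the six (src, rel, tgt) triples ('if rel:' = non-None, non-empty)
def pySeedA (relations : List (String × Option String × String)) :
    PySem.Dict (String × String) String :=
  relations.foldl (fun d t =>
    match t.2.1 with
    | some r => if r ≠ "" then (d.insert (t.1, t.2.2) r).insert (t.2.2, t.1) (pyInvRel r) else d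
    | none => d) PySem.Dict.empty

-- one body of A's while loop: the inferred_relations dict of one round
def pyPassA (g : PySem.Dict (String × String) String) : PySem.Dict (String × String) String :=
  g.items.foldl (fun inf p =>
    g.items.foldl (fun inf q =>
      let cond1 := p.1.2 == q.1.1 && p.1.1 != q.1.2
      let cond2 := !(g.contains (p.1.1, q.1.2))
      let cond3 := !(g.contains (q.1.2, p.1.1))
      match pyPointTrans p.2 q.2 with
      | some rel =>
          if cond1 && cond2 && cond3 then
            (inf.insert (p.1.1, q.1.2) rel).insert (q.1.2, p.1.1) (pyInvRel rel)
          else inf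
      | none => inf) inf) PySem.Dict.empty

-- A's while loop; the fuel only makes the recursion total: inside Pre_ every
-- productive round adds at least one of 12 possible keys, so 16 is never exhausted
def pyLoopA : Nat → PySem.Dict (String × String) String → PySem.Dict (String × String) String
  | 0, g => g
  | n + 1, g =>
      let inf := pyPassA g
      if inf.size = 0 then g else pyLoopA n (g.update inf.items)

def complete_py (start_start : Option String) (start_end : Option String)
    (end_start : Option String) (end_end : Option String) : List (Option String) :=
  let relations : List (String × Option String × String) :=
    [("ss", start_start, "ts"), ("ss", start_end, "te"), ("se", end_start, "ts"),
     ("se", end_end, "te"), ("ss", some "<", "se"), ("ts", some "<", "te")]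
  let g := pyLoopA 16 (pySeedA relations)
  (relations.take 4).map (fun t => g.get? (t.1, t.2.2))

-- ===== PORT B =====
-- _comp: composition of definite point relations, computed arithmetically
def altComp (x y : String) : Option String :=
  if x = "=" then some y
  else if y = "=" then some x
  else if x = y then some x else none

-- chain(x, y): None if either endpoint relation is unknown, else _comp
def altChain (x y : Option String) : Option String :=
  match x, y with
  | some a, some b => altComp a b
  | _, _ => none

-- first(u, v): u if u is not None else v
def altFirst (u v : Option String) : Option String :=
  match u with
  | some a => some a
  | none => v

-- the _REL[x] lookup at B's entry: falsy "" becomes None; exact for arguments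
-- admitted by Pre_ (on any other string Python raises KeyError)
def altOrNone (x : Option String) : Option String :=
  if x = some "" then none else x

-- one pass of B: fill each still-unknown slot from its two chains, in priority order
def altPass (s : Option String × Option String × Option String × Option String) :
    Option String × Option String × Option String × Option String :=
  let a := s.1; let b := s.2.1; let c := s.2.2.1; let d := s.2.2.2
  ((match a with | some _ => a | none => altFirst (altChain b (some ">")) (altChain (some "<") c)),
   (match b with | some _ => b | none => altFirst (altChain (some "<") d) (altChain a (some "<"))),
   (match c with | some _ => c | none => altFirst (altChain d (some ">")) (altChain (some ">") a)),
   (match d with | some _ => d | none => altFirst (altChain c (some "<")) (altChain (some ">") b)))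

-- B's while-changed loop; fuel only for totality (at most 2 productive passes occur)
def altLoop : Nat → (Option String × Option String × Option String × Option String) →
    Option String × Option String × Option String × Option String
  | 0, s => s
  | n + 1, s =>
      let t := altPass s
      if t = s then s else altLoop n t

def complete_py_alt (start_start : Option String) (start_end : Option String)
    (end_start : Option String) (end_end : Option String) : List (Option String) :=
  let s := altLoop 8
    (altOrNone start_start, altOrNone start_end, altOrNone end_start, altOrNone end_end)
  [s.1, s.2.1, s.2.2.1, s.2.2.2]

-- ===== PRECONDITION & SPEC =====
def pvAllowedRel : List (Option String) := [none, some "", some "<", some "=", some ">"]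

-- Pre_ admits exactly the arguments on which Python A returns: on any other
-- string A raises KeyError in INVERSE_POINT_RELATION[rel].
def Pre_complete_py (start_start : Option String) (start_end : Option String)
    (end_start : Option String) (end_end : Option String) : Prop :=
  start_start ∈ pvAllowedRel ∧ start_end ∈ pvAllowedRel ∧
  end_start ∈ pvAllowedRel ∧ end_end ∈ pvAllowedRel

instance (start_start : Option String) (start_end : Option String) (end_start : Option String) (end_end : Option String) : Decidable (Pre_complete_py start_start start_end end_start end_end) := by unfold Pre_complete_py; infer_instance

def pvWitness_complete_py : Option String × Option String × Option String × Option String :=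
  (some "<", none, none, some "<")

def Spec_complete_py (start_start : Option String) (start_end : Option String) (end_start : Option String) (end_end : Option String) (out : List (Option String)) : Prop := out = complete_py_alt start_start start_end end_start end_end
instance (start_start : Option String) (start_end : Option String) (end_start : Option String) (end_end : Option String) (out : List (Option String)) : Decidable (Spec_complete_py start_start start_end end_start end_end out) := by unfold Spec_complete_py; infer_instance

-- ===== CLAIM =====
def Claim_equal_complete_py : Prop := ∀ (start_start : Option String) (start_end : Option String) (end_start : Option String) (end_end : Option String), Dom_complete_py start_start start_end end_start end_end → Pre_complete_py start_start start_end end_start end_end → Spec_complete_py start_start start_end end_start end_end (complete_py start_start start_end end_start end_end)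

-- ===== LEMMAS AND PROOFS =====
-- a relation argument some "" ('if rel:' / 'or None' falsy) acts exactly like None: definitional
theorem pv_bridge_a1 (b c d : Option String) : complete_py (some "") b c d = complete_py none b c d := rfl
theorem pv_bridge_a2 (a c d : Option String) : complete_py a (some "") c d = complete_py a none c d := rfl
theorem pv_bridge_a3 (a b d : Option String) : complete_py a b (some "") d = complete_py a b none d := rfl
theorem pv_bridge_a4 (a b c : Option String) : complete_py a b c (some "") = complete_py a b c none := rfl
theorem pv_bridge_b1 (b c d : Option String) : complete_py_alt (some "") b c d = complete_py_alt none b c d := rfl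
theorem pv_bridge_b2 (a c d : Option String) : complete_py_alt a (some "") c d = complete_py_alt a none c d := rfl
theorem pv_bridge_b3 (a b d : Option String) : complete_py_alt a b (some "") d = complete_py_alt a b none d := rfl
theorem pv_bridge_b4 (a b c : Option String) : complete_py_alt a b c (some "") = complete_py_alt a b c none := rfl

-- normalisation: send some "" to none; the four proper relation values
def pvNorm (x : Option String) : Option String := if x = some "" then none else x
def pvL4 : List (Option String) := [none, some "<", some "=", some ">"]

theorem pvNorm_mem (x : Option String) (h : x ∈ pvAllowedRel) : pvNorm x ∈ pvL4 := by
  fin_cases h <;> decide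

theorem pv_na1 (a b c d : Option String) : complete_py a b c d = complete_py (pvNorm a) b c d := by
  unfold pvNorm; split_ifs with h
  · rw [h, pv_bridge_a1]
  · rfl
theorem pv_na2 (a b c d : Option String) : complete_py a b c d = complete_py a (pvNorm b) c d := by
  unfold pvNorm; split_ifs with h
  · rw [h, pv_bridge_a2]
  · rfl
theorem pv_na3 (a b c d : Option String) : complete_py a b c d = complete_py a b (pvNorm c) d := by
  unfold pvNorm; split_ifs with h
  · rw [h, pv_bridge_a3]
  · rfl
theorem pv_na4 (a b c d : Option String) : complete_py a b c d = complete_py a b c (pvNorm d) := by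
  unfold pvNorm; split_ifs with h
  · rw [h, pv_bridge_a4]
  · rfl
theorem pv_nb1 (a b c d : Option String) : complete_py_alt a b c d = complete_py_alt (pvNorm a) b c d := by
  unfold pvNorm; split_ifs with h
  · rw [h, pv_bridge_b1]
  · rfl
theorem pv_nb2 (a b c d : Option String) : complete_py_alt a b c d = complete_py_alt a (pvNorm b) c d := by
  unfold pvNorm; split_ifs with h
  · rw [h, pv_bridge_b2]
  · rfl
theorem pv_nb3 (a b c d : Option String) : complete_py_alt a b c d = complete_py_alt a b (pvNorm c) d := by
  unfold pvNorm; split_ifs with h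
  · rw [h, pv_bridge_b3]
  · rfl
theorem pv_nb4 (a b c d : Option String) : complete_py_alt a b c d = complete_py_alt a b c (pvNorm d) := by
  unfold pvNorm; split_ifs with h
  · rw [h, pv_bridge_b4]
  · rfl

theorem pv_exhaustive :
    ∀ a ∈ pvL4, ∀ b ∈ pvL4, ∀ c ∈ pvL4, ∀ d ∈ pvL4,
      complete_py a b c d = complete_py_alt a b c d := by decide

-- ===== VERDICT =====
theorem complete_py_spec : Claim_equal_complete_py := by
  intro a b c d _ hPre
  obtain ⟨ha, hb, hc, hd⟩ := hPre
  unfold Spec_complete_py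
  rw [pv_na1, pv_na2, pv_na3, pv_na4, pv_nb1, pv_nb2, pv_nb3, pv_nb4]
  exact pv_exhaustive _ (pvNorm_mem a ha) _ (pvNorm_mem b hb) _ (pvNorm_mem c hc) _ (pvNorm_mem d hd)
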